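-- pv_equiv track=rewrite | github.com/franchesoni/acontrario_mode_detection | methods.py | get_meaningful_modes
-- ===== SOURCE A (Python) =====
-- def get_meaningful_modes(meaningful_intervals, values, meaningful_gaps):
--     meaningful_modes = meaningful_intervals.copy()
--     mode_values = values.copy()
--     indices_to_remove = []
--     for idx, (ainterval, binterval) in enumerate(meaningful_modes):
--         for agap, bgap in meaningful_gaps:
--             if ainterval <= agap <= bgap <= binterval:  # if contains gap
--                 indices_to_remove.append(idx)
--                 break
--     indices_to_remove = sorted(indices_to_remove)[::-1]  # larger first
--     for idx_to_remove in indices_to_remove: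
--         del meaningful_modes[idx_to_remove]
--         del mode_values[idx_to_remove]
--     return meaningful_modes, mode_values
-- ===== SOURCE B (Python) =====
-- def get_meaningful_modes(meaningful_intervals, values, meaningful_gaps):
--     bad = {i for i, (a, b) in enumerate(meaningful_intervals)
--            if any(a <= ag <= bg <= b for ag, bg in meaningful_gaps)}
--     modes = [iv for i, iv in enumerate(meaningful_intervals) if i not in bad]
--     vals = [v for i, v in enumerate(values) if i not in bad]
--     return modes, vals
-- ===== Notes on version B (the rewrite author's own statement) =====
-- stated objective: simpler
-- what changed: A collects removal indices in a loop with break, sorts them descending and deletes in place from both lists; B builds the set of bad indices once with a set comprehension and returns both lists by filtering comprehensions (no sort, no in-place deletion). Pre_ excludes only inputs on which A raises IndexError (a removable interval index beyond len(values)).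
import Mathlib
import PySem

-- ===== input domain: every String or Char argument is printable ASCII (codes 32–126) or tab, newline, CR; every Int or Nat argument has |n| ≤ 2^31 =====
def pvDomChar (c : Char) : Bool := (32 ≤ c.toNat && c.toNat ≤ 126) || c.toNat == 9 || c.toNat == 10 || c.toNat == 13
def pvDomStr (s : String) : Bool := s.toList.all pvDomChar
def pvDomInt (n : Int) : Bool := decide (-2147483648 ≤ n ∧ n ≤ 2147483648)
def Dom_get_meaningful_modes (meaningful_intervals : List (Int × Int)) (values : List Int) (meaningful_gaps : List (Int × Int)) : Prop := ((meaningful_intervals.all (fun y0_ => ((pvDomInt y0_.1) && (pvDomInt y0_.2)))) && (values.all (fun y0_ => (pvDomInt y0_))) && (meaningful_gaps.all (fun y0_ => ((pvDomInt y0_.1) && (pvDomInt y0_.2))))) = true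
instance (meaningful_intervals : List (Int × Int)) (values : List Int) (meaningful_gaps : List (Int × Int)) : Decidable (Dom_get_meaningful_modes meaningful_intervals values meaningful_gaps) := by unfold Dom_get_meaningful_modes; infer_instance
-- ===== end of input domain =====

-- B replaces A's index-collecting loop + sort + reverse in-place deletion by one set of bad
-- indices and two filtering passes (objective: simpler, same asymptotic cost).

-- ===== PORT A =====
-- literal transliteration of A: collect indices of intervals containing a gap (inner loop with
-- break = List.any), sort them, reverse ([::-1] = List.reverse), then delete index by index
-- (Python 'del xs[i]'; indices here are ≥ 0, so '.toNat' is exact).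
def get_meaningful_modes (meaningful_intervals : List (Int × Int)) (values : List Int) (meaningful_gaps : List (Int × Int)) : (List (Int × Int)) × List Int :=
  let meaningful_modes := meaningful_intervals
  let mode_values := values
  let indices_to_remove : List Int :=
    (PySem.List.enumerate meaningful_modes 0).foldl
      (fun acc p =>
        if meaningful_gaps.any (fun g => decide (p.2.1 ≤ g.1) && decide (g.1 ≤ g.2) && decide (g.2 ≤ p.2.2))
        then acc ++ [p.1] else acc) []
  let indices_sorted := (PySem.List.sorted indices_to_remove (fun x => x) false).reverse
  indices_sorted.foldl
    (fun st idx => (st.1.eraseIdx idx.toNat, st.2.eraseIdx idx.toNat))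
    (meaningful_modes, mode_values)

-- ===== PORT B =====
-- literal transliteration of Source B: the set comprehension over enumerate(intervals) is
-- PySem.Set.ofList of the filtered index list; the two list comprehensions are filterMaps
-- over enumerate with an 'i not in bad' (Set.contains) test.
def get_meaningful_modes_alt (meaningful_intervals : List (Int × Int)) (values : List Int) (meaningful_gaps : List (Int × Int)) : (List (Int × Int)) × List Int :=
  let bad : PySem.Set Int := PySem.Set.ofList
    (((PySem.List.enumerate meaningful_intervals 0).filter
        (fun p => meaningful_gaps.any (fun g => decide (p.2.1 ≤ g.1) && decide (g.1 ≤ g.2) && decide (g.2 ≤ p.2.2)))).map (fun p => p.1))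
  let modes := (PySem.List.enumerate meaningful_intervals 0).filterMap
    (fun p => if PySem.Set.contains bad p.1 then none else some p.2)
  let vals := (PySem.List.enumerate values 0).filterMap
    (fun p => if PySem.Set.contains bad p.1 then none else some p.2)
  (modes, vals)

-- ===== PRECONDITION & SPEC =====
-- Pre_ excludes exactly the inputs on which Python A raises IndexError: an interval at index i with
-- i ≥ len(values) that contains a meaningful gap makes A's 'del mode_values[i]' go out of range.
def Pre_get_meaningful_modes (meaningful_intervals : List (Int × Int)) (values : List Int) (meaningful_gaps : List (Int × Int)) : Prop :=
  ∀ p ∈ PySem.List.enumerate meaningful_intervals 0,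
    p.1 < (values.length : Int) ∨ ∀ g ∈ meaningful_gaps, ¬(p.2.1 ≤ g.1 ∧ g.1 ≤ g.2 ∧ g.2 ≤ p.2.2)
instance (meaningful_intervals : List (Int × Int)) (values : List Int) (meaningful_gaps : List (Int × Int)) : Decidable (Pre_get_meaningful_modes meaningful_intervals values meaningful_gaps) := by unfold Pre_get_meaningful_modes; infer_instance
def pvWitness_get_meaningful_modes : (List (Int × Int)) × List Int × (List (Int × Int)) := ([(0, 5), (6, 9)], [1, 2], [(7, 8)])

def Spec_get_meaningful_modes (meaningful_intervals : List (Int × Int)) (values : List Int) (meaningful_gaps : List (Int × Int)) (out : (List (Int × Int)) × List Int) : Prop := out = get_meaningful_modes_alt meaningful_intervals values meaningful_gaps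
instance (meaningful_intervals : List (Int × Int)) (values : List Int) (meaningful_gaps : List (Int × Int)) (out : (List (Int × Int)) × List Int) : Decidable (Spec_get_meaningful_modes meaningful_intervals values meaningful_gaps out) := by unfold Spec_get_meaningful_modes; infer_instance

-- ===== CLAIM (what is proved, stated in full; the proofs are below) =====
def Claim_equal_get_meaningful_modes : Prop := ∀ (meaningful_intervals : List (Int × Int)) (values : List Int) (meaningful_gaps : List (Int × Int)), Dom_get_meaningful_modes meaningful_intervals values meaningful_gaps → Pre_get_meaningful_modes meaningful_intervals values meaningful_gaps → Spec_get_meaningful_modes meaningful_intervals values meaningful_gaps (get_meaningful_modes meaningful_intervals values meaningful_gaps)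
-- ===== LEMMAS AND PROOFS =====

-- "interval p contains some gap of gs" (A's inner-loop test, B's set-comprehension test).
def hitAny (gs : List (Int × Int)) (p : Int × Int) : Bool :=
  gs.any (fun g => decide (p.1 ≤ g.1) && decide (g.1 ≤ g.2) && decide (g.2 ≤ p.2))

-- keep the elements of xs whose position (counted from k) satisfies P
def keepF {α : Type} (k : Nat) (P : Nat → Bool) : List α → List α
  | [] => []
  | x :: t => (if P k then [x] else []) ++ keepF (k + 1) P t

theorem keepF_true {α : Type} (k : Nat) (P : Nat → Bool) (xs : List α)
    (h : ∀ j, k ≤ j → P j = true) : keepF k P xs = xs := by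
  induction xs generalizing k with
  | nil => rfl
  | cons x t ih => simp [keepF, h k le_rfl, ih (k+1) (fun j hj => h j (by omega))]

theorem keepF_congr {α : Type} (k : Nat) (P Q : Nat → Bool) (xs : List α)
    (h : ∀ j, P j = Q j) : keepF k P xs = keepF k Q xs := by
  induction xs generalizing k with
  | nil => rfl
  | cons x t ih => simp only [keepF, h k, ih (k+1)]

theorem keepF_erase {α : Type} (xs : List α) (i k : Nat) (P : Nat → Bool)
    (h : ∀ j, k + i ≤ j → P j = true) :
    keepF k P (xs.eraseIdx i) = keepF k (fun j => if j = k + i then false else P j) xs := by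
  induction xs generalizing i k with
  | nil => rfl
  | cons x t ih =>
    cases i with
    | zero =>
      simp only [List.eraseIdx_zero, List.tail_cons, keepF]
      rw [keepF_true k P t (fun j hj => h j (by omega)),
          keepF_true (k+1) _ t (fun j hj => by
            rw [if_neg (by omega)]
            exact h j (by omega))]
      simp
    | succ i' =>
      simp only [List.eraseIdx_cons_succ, keepF]
      have hk : (if k = k + (i' + 1) then false else P k) = P k := by
        rw [if_neg (by omega)]
      simp only [hk]
      rw [ih i' (k+1) (fun j hj => h j (by omega)),
          keepF_congr (k+1) _ _ t (fun j => by
            have h3 : k + 1 + i' = k + (i' + 1) := by omega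
            rw [h3])]

-- deleting a strictly descending list of indices is an index filter
theorem foldl_erase_desc {α : Type} (il : List Nat) (xs : List α)
    (h : il.Pairwise (· > ·)) :
    il.foldl (fun ys i => ys.eraseIdx i) xs = keepF 0 (fun j => decide (j ∉ il)) xs := by
  induction il generalizing xs with
  | nil =>
    rw [List.foldl_nil]
    exact (keepF_true 0 _ xs (fun j _ => by simp)).symm
  | cons i rest ih =>
    rw [List.pairwise_cons] at h
    simp only [List.foldl_cons]
    rw [ih (xs.eraseIdx i) h.2,
        keepF_erase xs i 0 _ (fun j hj => by
          simp only [decide_eq_true_eq]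
          intro hmem; exact absurd (h.1 j hmem) (by omega))]
    refine keepF_congr 0 _ _ xs (fun j => ?_)
    by_cases hji : j = i <;> simp [hji]

-- a pair-state fold splits into two independent folds
theorem foldl_prod_erase {α β : Type} (il : List Int) (xs : List α) (ys : List β) :
    il.foldl (fun st idx => (st.1.eraseIdx idx.toNat, st.2.eraseIdx idx.toNat)) (xs, ys)
      = (il.foldl (fun l idx => l.eraseIdx idx.toNat) xs,
         il.foldl (fun l idx => l.eraseIdx idx.toNat) ys) := by
  induction il generalizing xs ys with
  | nil => rfl
  | cons i t ih => simp [List.foldl_cons, ih]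

-- the two ports compute the same pair
theorem ports_eq (mi : List (Int × Int)) (vs : List Int) (gs : List (Int × Int)) :
    get_meaningful_modes mi vs gs = get_meaningful_modes_alt mi vs gs := by
  simp only [get_meaningful_modes, get_meaningful_modes_alt]
  -- A's index-collecting fold is a filter+map; B's set comprehension is the same list
  rw [PySem.List.foldl_append_if, List.nil_append]
  set itr : List Int := ((PySem.List.enumerate mi 0).filter
      (fun p => gs.any (fun g => decide (p.2.1 ≤ g.1) && decide (g.1 ≤ g.2) && decide (g.2 ≤ p.2.2)))).map (fun p => p.1) with hitr
  -- itr is strictly increasing, so sorting it is the identity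
  have hlt : itr.Pairwise (· < ·) := by
    rw [hitr]
    exact List.Pairwise.map _ (fun a b h => h)
      (((PySem.List.pairwise_lt_enumerate mi 0).filter _))
  have hs : PySem.List.sorted itr (fun x => x) false = itr :=
    PySem.List.sorted_eq_of_perm_of_pairwise_lt _ _ (fun x => x) (List.Perm.refl itr) hlt
  rw [hs]
  -- membership characterization of itr
  have hmemI : ∀ i : Int, i ∈ itr ↔ ∃ j : Nat, ∃ hj : j < mi.length, i = (j : Int) ∧ hitAny gs mi[j] = true := by
    intro i
    rw [hitr]
    simp only [List.mem_map, List.mem_filter]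
    constructor
    · rintro ⟨p, ⟨hpm, hph⟩, rfl⟩
      rw [PySem.List.mem_enumerate_iff] at hpm
      obtain ⟨k, hk, rfl⟩ := hpm
      exact ⟨k, hk, by simp, by simpa [hitAny] using hph⟩
    · rintro ⟨j, hj, rfl, hh⟩
      refine ⟨((j : Int), mi[j]), ⟨?_, by simpa [hitAny] using hh⟩, rfl⟩
      rw [PySem.List.mem_enumerate_iff]
      exact ⟨j, hj, by simp⟩
  -- the Nat version of the reversed index list
  set ilnat : List Nat := itr.reverse.map Int.toNat with hilnat
  have hmemN : ∀ j : Nat, j ∈ ilnat ↔ ∃ hj : j < mi.length, hitAny gs mi[j] = true := by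
    intro j
    rw [hilnat]
    simp only [List.mem_map, List.mem_reverse]
    constructor
    · rintro ⟨i, hi, rfl⟩
      obtain ⟨k, hk, rfl, hh⟩ := (hmemI i).mp hi
      exact ⟨by simpa using hk, by simpa using hh⟩
    · rintro ⟨hj, hh⟩
      exact ⟨(j : Int), (hmemI _).mpr ⟨j, hj, rfl, hh⟩, by simp⟩
  have hdesc : ilnat.Pairwise (· > ·) := by
    rw [hilnat, List.pairwise_map, List.pairwise_reverse]
    refine List.Pairwise.imp_of_mem (fun {a b} ha hb hab => ?_) hlt
    obtain ⟨ja, hja, rfl, _⟩ := (hmemI a).mp ha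
    obtain ⟨jb, hjb, rfl, _⟩ := (hmemI b).mp hb
    omega
  -- A's deletion loop
  rw [foldl_prod_erase]
  have hfm : ∀ {β : Type} (xs : List β),
      itr.reverse.foldl (fun l idx => l.eraseIdx idx.toNat) xs
        = keepF 0 (fun j => decide (j ∉ ilnat)) xs := by
    intro β xs
    rw [← foldl_erase_desc ilnat xs hdesc, hilnat, List.foldl_map]
  rw [hfm mi, hfm vs]
  -- B's two filterMaps
  have hB : ∀ {α : Type} (xs : List α),
      (PySem.List.enumerate xs 0).filterMap
        (fun p => if PySem.Set.contains (PySem.Set.ofList itr) p.1 then none else some p.2)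
        = keepF 0 (fun j => decide (j ∉ ilnat)) xs := by
    intro α xs
    suffices h : ∀ k : Nat,
        (PySem.List.enumerate xs ((k : Nat) : Int)).filterMap
          (fun p => if PySem.Set.contains (PySem.Set.ofList itr) p.1 then none else some p.2)
          = keepF k (fun j => decide (j ∉ ilnat)) xs by
      simpa using h 0
    intro k
    induction xs generalizing k with
    | nil => simp [keepF]
    | cons x t ih =>
      have ih' := ih (k + 1)
      rw [show ((k + 1 : Nat) : Int) = ((k : Nat) : Int) + 1 by push_cast; ring] at ih'
      rw [PySem.List.enumerate_cons]
      by_cases hm : k ∈ ilnat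
      · have hki : ((k : Nat) : Int) ∈ itr := by
          obtain ⟨hj, hh⟩ := (hmemN k).mp hm
          exact (hmemI _).mpr ⟨k, hj, rfl, hh⟩
        simp [keepF, hki, hm]
        simpa using ih'
      · have hki : ((k : Nat) : Int) ∉ itr := by
          intro hin
          obtain ⟨m, hjm, hmj, hh⟩ := (hmemI _).mp hin
          have hmk : m = k := by exact_mod_cast hmj.symm
          subst hmk
          exact hm ((hmemN m).mpr ⟨hjm, hh⟩)
        simp [keepF, hki, hm]
        simpa using ih'
  rw [hB mi, hB vs]

-- ===== VERDICT (by name: the statement is the Claim_ definition above) =====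
theorem get_meaningful_modes_spec : Claim_equal_get_meaningful_modes := by
  intro mi vs gs _ _
  unfold Spec_get_meaningful_modes
  exact ports_eq mi vs gs
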